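-- pv_equiv track=rewrite | github.com/shimech/higashi | src/ex4/split_iterable.py | split_iterable
-- ===== SOURCE A (Python) =====
-- def split_iterable(xs, y):
--     answer, part = [], []
--     for element in xs:
--         if element == y:
--             answer.append(part)
--             part = []
--         else:
--             part.append(element)
--     answer.append(part)
--     return answer
-- ===== SOURCE B (Python) =====
-- def split_iterable(xs, y):
--     xs = list(xs)
--     try:
--         i = xs.index(y)
--     except ValueError:
--         return [xs]
--     return [xs[:i]] + split_iterable(xs[i + 1:], y)
-- ===== Notes on version B (the rewrite author's own statement) =====
-- stated objective: alternative
-- what changed: Replaced the single accumulator loop (answer/part state) by a recursion that finds the first delimiter with list.index and slices the list around it.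
import Mathlib
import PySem

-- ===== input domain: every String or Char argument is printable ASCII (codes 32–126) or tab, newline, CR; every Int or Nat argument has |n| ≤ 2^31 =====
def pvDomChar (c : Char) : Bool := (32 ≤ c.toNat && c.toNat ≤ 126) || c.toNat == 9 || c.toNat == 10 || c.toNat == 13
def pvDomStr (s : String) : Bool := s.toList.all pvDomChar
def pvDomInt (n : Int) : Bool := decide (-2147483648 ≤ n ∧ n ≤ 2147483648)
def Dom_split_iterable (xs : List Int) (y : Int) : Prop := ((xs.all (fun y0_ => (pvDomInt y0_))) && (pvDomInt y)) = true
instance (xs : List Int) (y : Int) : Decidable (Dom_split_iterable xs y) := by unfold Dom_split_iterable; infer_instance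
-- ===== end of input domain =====

-- B replaces A's single accumulator loop by recursion on the first delimiter index (alternative decomposition, same cost).


-- ===== PORT A =====
-- the for-loop over xs with state (answer, part); after the loop, answer.append(part)
def splitGo (y : Int) (ans : List (List Int)) (part : List Int) : List Int → List (List Int)
  | [] => ans ++ [part]
  | e :: t => if e = y then splitGo y (ans ++ [part]) [] t else splitGo y ans (part ++ [e]) t

def split_iterable (xs : List Int) (y : Int) : List (List Int) :=
  splitGo y [] [] xs

-- ===== PORT B =====
-- xs.index(y) with its try/except ValueError ↦ test on PySem.List.index? (none = ValueError);
-- then [xs[:i]] + split_iterable(xs[i+1:], y), with the slices as take/drop at the Nat index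
def split_iterable_alt (xs : List Int) (y : Int) : List (List Int) :=
  if h : (PySem.List.index? xs y).isSome then
    let i := (PySem.List.index? xs y).get h
    (xs.take i) :: split_iterable_alt (xs.drop (i + 1)) y
  else [xs]
termination_by xs.length
decreasing_by
  have hsome : PySem.List.index? xs y = some ((PySem.List.index? xs y).get h) := by
    simp
  obtain ⟨hk, -, -⟩ := PySem.List.getElem_of_index?_eq_some hsome
  simp [List.length_drop]
  omega

-- ===== PRECONDITION & SPEC =====
def Spec_split_iterable (xs : List Int) (y : Int) (out : List (List Int)) : Prop := out = split_iterable_alt xs y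
instance (xs : List Int) (y : Int) (out : List (List Int)) : Decidable (Spec_split_iterable xs y out) := by unfold Spec_split_iterable; infer_instance

-- ===== CLAIM (what is proved, stated in full; the proofs are below) =====
def Claim_equal_split_iterable : Prop := ∀ (xs : List Int) (y : Int), Dom_split_iterable xs y → Spec_split_iterable xs y (split_iterable xs y)

-- ===== LEMMAS AND PROOFS =====

theorem alt_none (xs : List Int) (y : Int) (h : PySem.List.index? xs y = none) :
    split_iterable_alt xs y = [xs] := by
  rw [split_iterable_alt, dif_neg (by rw [h]; simp)]

theorem alt_some (xs : List Int) (y : Int) (i : Nat) (h : PySem.List.index? xs y = some i) :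
    split_iterable_alt xs y = (xs.take i) :: split_iterable_alt (xs.drop (i + 1)) y := by
  have hs : (PySem.List.index? xs y).isSome := by rw [h]; rfl
  have hg : (PySem.List.index? xs y).get hs = i :=
    Option.some.inj ((Option.some_get hs).trans h)
  rw [split_iterable_alt, dif_pos hs]
  simp only [hg]

theorem splitGo_append (y : Int) (xs : List Int) :
    ∀ (ans : List (List Int)) (part : List Int),
      splitGo y ans part xs = ans ++ splitGo y [] part xs := by
  induction xs with
  | nil => intro ans part; simp [splitGo]
  | cons e t ih =>
    intro ans part
    by_cases h : e = y
    · simp [splitGo, h, ih (ans ++ [part])]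
      rw [ih [part]]
      simp
    · simp [splitGo, h, ih ans (part ++ [e])]

theorem splitGo_key (y : Int) (xs : List Int) :
    ∀ (part : List Int),
      splitGo y [] part xs =
        match PySem.List.index? xs y with
        | none => [part ++ xs]
        | some i => (part ++ xs.take i) :: split_iterable_alt (xs.drop (i + 1)) y := by
  induction xs with
  | nil => intro part; simp [splitGo, PySem.List.index?]
  | cons e t ih =>
    intro part
    by_cases h : e = y
    · subst h
      rw [PySem.List.index?_cons_self e t]
      have hgo : splitGo e [] part (e :: t) = [part] ++ splitGo e [] [] t := by
        simp [splitGo]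
        rw [splitGo_append]
        simp
      rw [hgo, ih]
      cases hti : PySem.List.index? t e with
      | none => simp [alt_none t e hti]
      | some i => simp [alt_some t e i hti]
    · rw [PySem.List.index?_cons_of_ne t h]
      have hgo : splitGo y [] part (e :: t) = splitGo y [] (part ++ [e]) t := by
        simp [splitGo, h]
      rw [hgo, ih]
      cases hti : PySem.List.index? t y with
      | none => simp
      | some i => simp

-- ===== VERDICT (by name: the statement is the Claim_ definition above) =====
theorem split_iterable_spec : Claim_equal_split_iterable := by
  intro xs y _
  show split_iterable xs y = split_iterable_alt xs y
  rw [split_iterable, splitGo_key]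
  cases h : PySem.List.index? xs y with
  | none => simp [alt_none xs y h]
  | some i => simp [alt_some xs y i h]
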